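-- pv_equiv track=rewrite | github.com/petermd/aoc2020 | day1.py | find
-- ===== SOURCE A (Python) =====
-- def find(match, left, start, total, steps):
--     if steps == 0:
--         return total if left == 0 else 0
--     for i in range(start, 0, -1):
--         if match[i] and i <= left:
--             res = find(match, left - i, min(i - 1, left), total * i, steps - 1)
--             if res > 0:
--                 return res
--     return 0
-- ===== SOURCE B (Python) =====
-- def find(match, left, start, total, steps):
--     if steps == 0:
--         return total if left == 0 else 0
--     # iterative DFS with an explicit LIFO stack of frames (left, total, steps, bound);
--     # the innermost level (steps == 1) is resolved by a direct lookup match[l]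
--     # instead of a linear scan.
--     stack = [(left, total, steps, min(start, left))]
--     while stack:
--         l, t, st, i = stack.pop()
--         if st == 1:
--             if 1 <= l <= i and match[l] and t * l > 0:
--                 return t * l
--             continue
--         if i <= 0:
--             continue
--         stack.append((l, t, st, i - 1))
--         if match[i]:
--             stack.append((l - i, t * i, st - 1, min(i - 1, l - i)))
--     return 0
-- ===== Notes on version B (the rewrite author's own statement) =====
-- stated objective: alternative
-- what changed: B replaces A's recursive backtracking by an iterative DFS over an explicit LIFO stack of (left, total, steps, bound) frames, and resolves the innermost level (steps == 1) by a direct lookup match[l] instead of a linear scan.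
import Mathlib
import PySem

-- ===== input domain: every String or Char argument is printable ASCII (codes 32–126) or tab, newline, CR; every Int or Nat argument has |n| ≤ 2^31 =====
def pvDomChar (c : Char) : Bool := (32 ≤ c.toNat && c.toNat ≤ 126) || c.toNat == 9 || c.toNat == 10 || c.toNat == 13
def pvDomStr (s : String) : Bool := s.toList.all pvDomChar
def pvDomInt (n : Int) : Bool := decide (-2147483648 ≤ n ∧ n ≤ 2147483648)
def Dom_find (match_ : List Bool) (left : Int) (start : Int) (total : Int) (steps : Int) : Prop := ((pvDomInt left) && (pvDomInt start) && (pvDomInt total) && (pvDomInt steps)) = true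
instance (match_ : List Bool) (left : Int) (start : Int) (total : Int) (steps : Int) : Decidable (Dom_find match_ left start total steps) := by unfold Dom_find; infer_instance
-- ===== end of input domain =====

-- B replaces A's recursion by an iterative DFS over an explicit LIFO stack of frames and resolves
-- the innermost level (steps == 1) by a direct lookup match[l] instead of a linear scan (objective:
-- alternative — a different decomposition and data structure, not measured faster).


-- termination measures of the two ports (cited by name from 'decreasing_by')
lemma loopA_dec (n : Nat) (left : Int) : (min ((n : Int) + 1 - 1) left).toNat < n + 1 :=
  Nat.lt_succ_of_le (le_trans
    (Int.toNat_le_toNat (le_trans (min_le_left _ _) (le_of_eq (add_sub_cancel_right _ _))))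
    (le_of_eq (Int.toNat_natCast n)))

-- weight of one stack frame of B's machine: 4^(loop counter); the stack measure is the sum
def wFrame (f : Int × Int × Int × Int) : Nat := 4 ^ f.2.2.2.toNat

lemma wFrame_pos (f : Int × Int × Int × Int) : 0 < wFrame f := Nat.pow_pos (by omega)

lemma stack_dec_pop (f : Int × Int × Int × Int) (rest : List (Int × Int × Int × Int)) :
    (rest.map wFrame).sum < ((f :: rest).map wFrame).sum := by
  simp [List.map_cons]; exact Nat.lt_add_of_pos_left (wFrame_pos f)

lemma stack_dec_push (l t st i : Int) (hi : ¬ i ≤ 0) (rest : List (Int × Int × Int × Int)) :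
    ((((l - i, t * i, st - 1, min (i - 1) (l - i)) :: (l, t, st, i - 1) :: rest).map wFrame).sum)
      < (((l, t, st, i) :: rest).map wFrame).sum := by
  simp only [List.map_cons, List.sum_cons, wFrame]
  have h1 : (min (i - 1) (l - i)).toNat ≤ (i - 1).toNat :=
    Int.toNat_le_toNat (min_le_left _ _)
  have h2 : i.toNat = (i - 1).toNat + 1 := by omega
  have h3 : (4:Nat) ^ (min (i - 1) (l - i)).toNat ≤ 4 ^ (i - 1).toNat :=
    Nat.pow_le_pow_right (by omega) h1
  have h4 : (4:Nat) ^ (i - 1).toNat + 4 ^ (i - 1).toNat < 4 ^ ((i - 1).toNat + 1) := by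
    have := Nat.pow_pos (n := (i - 1).toNat) (show 0 < 4 by omega)
    rw [pow_succ]; omega
  rw [h2]; omega

lemma stack_dec_cont (l t st i : Int) (hi : ¬ i ≤ 0) (rest : List (Int × Int × Int × Int)) :
    ((((l, t, st, i - 1) :: rest).map wFrame).sum) < (((l, t, st, i) :: rest).map wFrame).sum := by
  simp only [List.map_cons, List.sum_cons, wFrame]
  have h3 : (4:Nat) ^ (i - 1).toNat < 4 ^ i.toNat :=
    Nat.pow_lt_pow_right (by omega) (by omega)
  omega

-- ===== PORT A =====
-- A's 'for i in range(start, 0, -1)' runs over i = start, …, 1, i.e. start.toNat iterations with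
-- i = n + 1 at the step whose counter is n; the recursive call 'find(match, left-i, min(i-1,left),
-- total*i, steps-1)' is inlined by one step (its 'steps == 0' entry test) so that the loop is a
-- single recursion; match[i] is PySem.List.pyGetD (in range on every admitted input, see Pre_find).
def findLoopA (match_ : List Bool) (left : Int) (total : Int) (steps : Int) : Nat → Int
  | 0 => 0
  | n + 1 =>
    if PySem.List.pyGetD match_ ((n : Int) + 1) false = true ∧ (n : Int) + 1 ≤ left then
      let res :=
        if steps - 1 == 0 then (if left - ((n : Int) + 1) == 0 then total * ((n : Int) + 1) else 0)
        else findLoopA match_ (left - ((n : Int) + 1)) (total * ((n : Int) + 1)) (steps - 1)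
               ((min ((n : Int) + 1 - 1) left).toNat)
      if res > 0 then res else findLoopA match_ left total steps n
    else findLoopA match_ left total steps n
termination_by n => n
decreasing_by all_goals first | exact loopA_dec n left | exact Nat.lt_succ_self n

def find (match_ : List Bool) (left : Int) (start : Int) (total : Int) (steps : Int) : Int :=
  if steps == 0 then (if left == 0 then total else 0)
  else findLoopA match_ left total steps start.toNat

-- ===== PORT B =====
-- B's 'while stack:' loop; a frame (l, t, st, i) is Python's tuple; 'stack.pop()' is the list head,
-- the two 'stack.append's become the two frames consed in pop order (child on top).
def runB (match_ : List Bool) : List (Int × Int × Int × Int) → Int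
  | [] => 0
  | (l, t, st, i) :: rest =>
    if st == 1 then
      if 1 ≤ l ∧ l ≤ i ∧ PySem.List.pyGetD match_ l false = true ∧ t * l > 0 then t * l
      else runB match_ rest
    else if i ≤ 0 then runB match_ rest
    else if PySem.List.pyGetD match_ i false = true then
      runB match_ ((l - i, t * i, st - 1, min (i - 1) (l - i)) :: (l, t, st, i - 1) :: rest)
    else runB match_ ((l, t, st, i - 1) :: rest)
termination_by stack => (stack.map wFrame).sum
decreasing_by
  · exact stack_dec_pop _ rest
  · exact stack_dec_pop _ rest
  · exact stack_dec_push l t st i (by assumption) rest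
  · exact stack_dec_cont l t st i (by assumption) rest

def find_alt (match_ : List Bool) (left : Int) (start : Int) (total : Int) (steps : Int) : Int :=
  if steps == 0 then (if left == 0 then total else 0)
  else runB match_ [(left, total, steps, min start left)]

-- ===== PRECONDITION & SPEC =====
-- Pre_find excludes exactly the inputs on which the Python A raises IndexError: unless steps == 0
-- (A returns before touching match), a non-empty top-level loop (start ≥ 1) first reads match[start],
-- so start must be inside match; all recursive calls then use strictly smaller indices, in range.
def Pre_find (match_ : List Bool) (left : Int) (start : Int) (total : Int) (steps : Int) : Prop :=
  steps = 0 ∨ (1 ≤ start → start < (match_.length : Int))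
instance (match_ : List Bool) (left : Int) (start : Int) (total : Int) (steps : Int) : Decidable (Pre_find match_ left start total steps) := by unfold Pre_find; infer_instance
def pvWitness_find : List Bool × Int × Int × Int × Int := ([false, true, true], 3, 2, 1, 2)

def Spec_find (match_ : List Bool) (left : Int) (start : Int) (total : Int) (steps : Int) (out : Int) : Prop := out = find_alt match_ left start total steps
instance (match_ : List Bool) (left : Int) (start : Int) (total : Int) (steps : Int) (out : Int) : Decidable (Spec_find match_ left start total steps out) := by unfold Spec_find; infer_instance

-- ===== CLAIM (what is proved, stated in full; the proofs are below) =====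
def Claim_equal_find : Prop := ∀ (match_ : List Bool) (left : Int) (start : Int) (total : Int) (steps : Int), Dom_find match_ left start total steps → Pre_find match_ left start total steps → Spec_find match_ left start total steps (find match_ left start total steps)

-- ===== LEMMAS AND PROOFS =====

-- A's loop at steps = 1: the scan is exactly the closed-form check B performs.
lemma loop1_aux (match_ : List Bool) :
    ∀ (n : Nat) (left total : Int),
      findLoopA match_ left total 1 n =
        (if 1 ≤ left ∧ left ≤ (n : Int) ∧ PySem.List.pyGetD match_ left false = true ∧ total * left > 0
         then total * left else 0) := by
  intro n
  induction n with
  | zero =>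
    intro left total
    rw [findLoopA, if_neg]
    rintro ⟨h1, h2, -, -⟩; omega
  | succ n ih =>
    intro left total
    rw [findLoopA]
    by_cases hc : PySem.List.pyGetD match_ ((n : Int) + 1) false = true ∧ (n : Int) + 1 ≤ left
    · rw [if_pos hc]
      simp only [show ((1:Int) - 1 == 0) = true from rfl, if_pos]
      by_cases he : left = (n : Int) + 1
      · rw [if_pos (show (left - ((n : Int) + 1) == 0) = true from by simp [he])]
        by_cases hp : total * ((n : Int) + 1) > 0
        · rw [if_pos hp, if_pos ⟨by omega, by omega, by rw [he]; exact hc.1, by rw [he]; exact hp⟩, he]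
        · rw [if_neg hp, ih, if_neg (by rintro ⟨-, h2, -, -⟩; omega),
            if_neg (by rintro ⟨-, -, -, h4⟩; rw [he] at h4; exact hp h4)]
      · rw [if_neg (show ¬ (left - ((n : Int) + 1) == 0) = true from by simp; omega),
            if_neg (by omega : ¬ (0:Int) > 0), ih]
        apply if_congr _ rfl rfl
        constructor
        · rintro ⟨a, b, c, d⟩; exact ⟨a, by omega, c, d⟩
        · rintro ⟨a, b, c, d⟩; exact ⟨a, by omega, c, d⟩
    · rw [if_neg hc, ih]
      apply if_congr _ rfl rfl
      constructor
      · rintro ⟨a, b, c, d⟩; exact ⟨a, by omega, c, d⟩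
      · rintro ⟨a, b, c, d⟩
        refine ⟨a, ?_, c, d⟩
        rcases eq_or_lt_of_le b with he | hlt
        · refine absurd ⟨?_, by omega⟩ hc
          have hl : (n : Int) + 1 = left := by omega
          rw [hl]; exact c
        · omega

-- A's loop skips every i > left, so it may start at min n left.
lemma loop_skip (match_ : List Bool) :
    ∀ (n : Nat) (left total steps : Int),
      findLoopA match_ left total steps n =
        findLoopA match_ left total steps ((min (n : Int) left).toNat) := by
  intro n
  induction n with
  | zero =>
    intro left total steps
    rw [show ((min ((0:Nat) : Int) left).toNat) = 0 from by omega]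
  | succ n ih =>
    intro left total steps
    by_cases hl : (n : Int) + 1 ≤ left
    · rw [show ((min (((n+1:Nat)) : Int) left).toNat) = n + 1 from by push_cast; omega]
    · rw [findLoopA, if_neg (by rintro ⟨-, h⟩; omega), ih,
        show ((min ((n:Nat) : Int) left).toNat) = (min (((n+1:Nat)) : Int) left).toNat from by push_cast; omega]

-- A's loop returns 0 or a positive value.
lemma loopA_pos_or_zero (match_ : List Bool) :
    ∀ (n : Nat) (left total steps : Int),
      0 < findLoopA match_ left total steps n ∨ findLoopA match_ left total steps n = 0 := by
  intro n
  induction n with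
  | zero => intro left total steps; right; rw [findLoopA]
  | succ n ih =>
    intro left total steps
    rw [findLoopA]
    by_cases hc : PySem.List.pyGetD match_ ((n : Int) + 1) false = true ∧ (n : Int) + 1 ≤ left
    · rw [if_pos hc]
      simp only
      split_ifs <;> first | (left; assumption) | exact ih left total steps
    · rw [if_neg hc]; exact ih left total steps

-- B's stack machine, one frame at a time: running frame :: rest returns the frame's DFS value
-- (A's loop value) when positive, and otherwise the run of the remaining stack.
lemma runB_cons (match_ : List Bool) :
    ∀ (m : Nat) (l t st i : Int) (rest : List (Int × Int × Int × Int)),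
      i.toNat ≤ m → i ≤ l →
      runB match_ ((l, t, st, i) :: rest) =
        (if findLoopA match_ l t st i.toNat > 0 then findLoopA match_ l t st i.toNat
         else runB match_ rest) := by
  intro m
  induction m using Nat.strong_induction_on with
  | _ m ih =>
    intro l t st i rest him hil
    rw [runB]
    by_cases h1 : st = 1
    · rw [if_pos (by simp [h1]), h1, loop1_aux]
      by_cases h0 : 0 ≤ i
      · have hcast : ((i.toNat : Int)) = i := by omega
        rw [hcast]
        by_cases hc : 1 ≤ l ∧ l ≤ i ∧ PySem.List.pyGetD match_ l false = true ∧ t * l > 0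
        · rw [if_pos hc, if_pos hc, if_pos hc.2.2.2]
        · rw [if_neg hc, if_neg hc, if_neg (by omega : ¬ (0:Int) > 0)]
      · have hC1 : ¬ (1 ≤ l ∧ l ≤ i ∧ PySem.List.pyGetD match_ l false = true ∧ t * l > 0) := by
          rintro ⟨a, b, -, -⟩; omega
        have hC2 : ¬ (1 ≤ l ∧ l ≤ ((i.toNat : Int)) ∧ PySem.List.pyGetD match_ l false = true ∧ t * l > 0) := by
          rintro ⟨a, b, -, -⟩; omega
        rw [if_neg hC1, if_neg hC2, if_neg (by omega : ¬ (0:Int) > 0)]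
    · rw [if_neg (by simp [h1])]
      by_cases h2 : i ≤ 0
      · rw [if_pos h2, show i.toNat = 0 from by omega, findLoopA,
          if_neg (by omega : ¬ (0:Int) > 0)]
      · rw [if_neg h2]
        have hm1 : 1 ≤ m := by omega
        have hn : i.toNat = (i - 1).toNat + 1 := by omega
        have hci : (((i - 1).toNat : Int)) + 1 = i := by omega
        rw [hn, findLoopA, hci]
        by_cases hg : PySem.List.pyGetD match_ i false = true
        · have hcond : PySem.List.pyGetD match_ i false = true ∧ i ≤ l := ⟨hg, hil⟩
          rw [if_pos hg, if_pos hcond]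
          rw [ih (m - 1) (by omega) (l - i) (t * i) (st - 1) (min (i - 1) (l - i))
                ((l, t, st, i - 1) :: rest) (by omega) (min_le_right _ _),
              ih (m - 1) (by omega) l t st (i - 1) rest (by omega) (by omega)]
          have hb0 : ¬ ((st - 1 == 0) = true) := by simp; omega
          rw [if_neg hb0,
              loop_skip match_ ((min (i - 1) l).toNat) (l - i) (t * i) (st - 1),
              show ((min (((min (i - 1) l).toNat : Int)) (l - i)).toNat)
                  = ((min (i - 1) (l - i)).toNat) from by omega]
          by_cases hres :
              findLoopA match_ (l - i) (t * i) (st - 1) ((min (i - 1) (l - i)).toNat) > 0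
          · rw [if_pos hres, if_pos hres, if_pos hres]
          · rw [if_neg hres, if_neg hres]
        · have hC : ¬ (PySem.List.pyGetD match_ i false = true ∧ i ≤ l) := fun h => hg h.1
          rw [if_neg hg, if_neg hC,
            ih (m - 1) (by omega) l t st (i - 1) rest (by omega) (by omega)]

lemma main_eq (match_ : List Bool) (left start total steps : Int) :
    find match_ left start total steps = find_alt match_ left start total steps := by
  rw [find, find_alt]
  by_cases h0 : steps = 0
  · simp [h0]
  · have hb0 : ¬ ((steps == 0) = true) := by simp [h0]
    rw [if_neg hb0, if_neg hb0,
      runB_cons match_ ((min start left).toNat) left total steps (min start left) []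
        le_rfl (min_le_right _ _),
      show runB match_ [] = 0 from by rw [runB],
      loop_skip match_ start.toNat left total steps,
      show ((min ((start.toNat : Int)) left).toNat) = ((min start left).toNat) from by omega]
    rcases loopA_pos_or_zero match_ ((min start left).toNat) left total steps with h | h
    · rw [if_pos h]
    · rw [h, if_neg (by omega : ¬ (0:Int) > 0)]

-- ===== VERDICT (by name: the statement is the Claim_ definition above) =====
theorem find_spec : Claim_equal_find := by
  intro match_ left start total steps _ _
  unfold Spec_find
  exact main_eq match_ left start total steps
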